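-- pv_equiv track=rewrite | github.com/pritamleo841/GFG-CODE-SOLUTIONS-PYTHON | Difficulty: Medium/N Digit numbers with digits in increasing order/n-digit-numbers-with-digits-in-increasing-order.py | increasingNumbers
-- ===== SOURCE A (Python) =====
-- from typing import List
--
-- def increasingNumbers(n : int) -> List[int]:
--     res = []
--     # Special case for n == 1: include 0
--     if n==1:
--         return [i for i in range(10)]
--     def generate(path,start):
--         if len(path)==n:
--             res.append(int("".join(map(str,path))))
--             return
--         for i in range(start,10):
--             path.append(i)
--             generate(path,i+1)
--             path.pop()
--     for i in range(1,10):
--         generate([i],i+1)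
--     return res
-- ===== SOURCE B (Python) =====
-- from itertools import combinations
-- from typing import List
--
-- def increasingNumbers(n: int) -> List[int]:
--     if n == 1:
--         return list(range(10))
--     if n < 1 or n > 9:
--         return []
--     return [int("".join(map(str, c))) for c in combinations(range(1, 10), n)]
-- ===== Notes on version B (the rewrite author's own statement) =====
-- stated objective: idiomatic
-- what changed: Replaces the nested recursive backtracking generator mutating a shared path/res with a single comprehension over itertools.combinations(range(1,10), n), which emits the same tuples in the same lexicographic order.
import Mathlib
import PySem

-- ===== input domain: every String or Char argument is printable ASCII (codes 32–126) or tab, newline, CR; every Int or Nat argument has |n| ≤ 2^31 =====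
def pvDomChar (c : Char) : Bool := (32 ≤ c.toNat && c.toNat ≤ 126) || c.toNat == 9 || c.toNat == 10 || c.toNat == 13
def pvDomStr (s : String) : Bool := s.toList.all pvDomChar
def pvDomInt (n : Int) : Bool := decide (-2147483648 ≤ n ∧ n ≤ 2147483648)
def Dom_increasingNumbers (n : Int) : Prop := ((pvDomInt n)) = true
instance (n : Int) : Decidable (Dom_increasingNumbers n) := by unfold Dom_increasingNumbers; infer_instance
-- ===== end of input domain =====

-- B replaces A's recursive backtracking generator with a comprehension over k-combinations (idiomatic; same cost).

-- ===== PORT A =====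
-- int("".join(map(str, path)))  (the path is never empty where this is called, so int() never sees "")
def pathToInt (path : List Int) : Int :=
  (PySem.Int.ofStr? (PySem.Str.join "" (path.map PySem.Int.toStr))).getD 0

mutual
  -- the body of `generate` after the len(path)==n check: `for i in range(start,10): …`
  def genFor (n : Int) (path : List Int) (start : Int) : List Int :=
    if _h : start < 10 then
      generate n (path ++ [start]) (start + 1) ++ genFor n path (start + 1)
    else []
  termination_by ((10 - start).toNat, 1)
  decreasing_by
  · exact Prod.Lex.left _ _ (by omega)
  · exact Prod.Lex.left _ _ (by omega)

  def generate (n : Int) (path : List Int) (start : Int) : List Int :=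
    if (path.length : Int) = n then [pathToInt path]
    else genFor n path start
  termination_by ((10 - start).toNat, 2)
  decreasing_by
  · exact Prod.Lex.right _ (by omega)
end

def increasingNumbers (n : Int) : List Int :=
  if n = 1 then PySem.List.pyRange 0 10 1
  else (PySem.List.pyRange 1 10 1).foldl (fun res i => res ++ generate n [i] (i + 1)) []

-- ===== PORT B =====
-- itertools.combinations in lexicographic emission order
def combs : Nat → List Int → List (List Int)
  | 0, _ => [[]]
  | _ + 1, [] => []
  | k + 1, x :: xs => (combs k xs).map (x :: ·) ++ combs (k + 1) xs

def increasingNumbers_alt (n : Int) : List Int :=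
  if n = 1 then PySem.List.pyRange 0 10 1
  else if n < 1 ∨ 9 < n then []
  else (combs n.toNat (PySem.List.pyRange 1 10 1)).map pathToInt

-- ===== PRECONDITION & SPEC =====
def Spec_increasingNumbers (n : Int) (out : List Int) : Prop := out = increasingNumbers_alt n
instance (n : Int) (out : List Int) : Decidable (Spec_increasingNumbers n out) := by unfold Spec_increasingNumbers; infer_instance

-- ===== CLAIM (what is proved, stated in full; the proofs are below) =====
def Claim_equal_increasingNumbers : Prop := ∀ (n : Int), Dom_increasingNumbers n → Spec_increasingNumbers n (increasingNumbers n)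

-- ===== LEMMAS AND PROOFS =====

-- When the path is already longer than n, `generate` can never append: it returns [].
theorem genFor_nil (fuel : Nat) (n : Int) : ∀ (start : Int) (path : List Int),
    (10 - start).toNat ≤ fuel → n < (path.length : Int) → genFor n path start = [] := by
  induction fuel with
  | zero =>
    intro start path hf _
    rw [genFor]
    simp only [dif_neg (by omega : ¬ start < 10)]
  | succ m ih =>
    intro start path hf hlen
    rw [genFor]
    by_cases h : start < 10
    · rw [dif_pos h, generate, if_neg (by simp; omega)]
      rw [ih _ _ (by omega) (by simp; omega), ih _ _ (by omega) hlen]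
      simp
    · rw [dif_neg h]

-- The loop enumerates exactly the (k+1)-combinations of range(start,10), extended onto path.
theorem genFor_eq (fuel : Nat) (n : Int) (k : Nat) : ∀ (start : Int) (path : List Int),
    (10 - start).toNat ≤ fuel → (path.length : Int) + (k + 1) = n →
    genFor n path start
      = (combs (k + 1) (PySem.List.pyRange start 10 1)).map (fun c => pathToInt (path ++ c)) := by
  induction fuel generalizing k with
  | zero =>
    intro start path hf _
    rw [genFor]
    rw [dif_neg (by omega : ¬ start < 10), PySem.List.pyRange_one_eq_nil (by omega)]
    cases k <;> simp [combs]
  | succ m ih =>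
    intro start path hf hlen
    rw [genFor]
    by_cases h : start < 10
    · rw [dif_pos h, PySem.List.pyRange_one_cons h]
      show _ = (combs (k + 1) (start :: _)).map _
      rw [combs]
      have hrest : genFor n path (start + 1)
          = (combs (k + 1) (PySem.List.pyRange (start + 1) 10 1)).map (fun c => pathToInt (path ++ c)) :=
        ih k _ _ (by omega) hlen
      cases k with
      | zero =>
        rw [generate, if_pos (by simp; omega)]
        simp only [combs, List.map_append, List.map_cons, List.map_nil, hrest]
      | succ k' =>
        rw [generate, if_neg (by simp; omega)]
        have hgen : genFor n (path ++ [start]) (start + 1)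
            = (combs (k' + 1) (PySem.List.pyRange (start + 1) 10 1)).map
                (fun c => pathToInt ((path ++ [start]) ++ c)) :=
          ih k' _ _ (by omega) (by simp; omega)
        rw [hgen, hrest]
        simp [List.map_map, Function.comp_def]
    · rw [dif_neg h, PySem.List.pyRange_one_eq_nil (by omega)]
      simp [combs]

-- combs over a tail segment of the range, expressed as a flatMap over first elements.
theorem combs_range_flatMap (fuel : Nat) (k : Nat) : ∀ (a : Int),
    (10 - a).toNat ≤ fuel →
    combs (k + 1) (PySem.List.pyRange a 10 1)
      = (PySem.List.pyRange a 10 1).flatMap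
          (fun i => (combs k (PySem.List.pyRange (i + 1) 10 1)).map (i :: ·)) := by
  induction fuel with
  | zero =>
    intro a hf
    rw [PySem.List.pyRange_one_eq_nil (by omega)]
    simp [combs]
  | succ m ih =>
    intro a hf
    by_cases h : a < 10
    · rw [PySem.List.pyRange_one_cons h, combs, List.flatMap_cons, ih (a + 1) (by omega)]
    · rw [PySem.List.pyRange_one_eq_nil (by omega)]
      simp [combs]

-- combinations of more elements than the list holds: none.
theorem combs_nil : ∀ (xs : List Int) (k : Nat), xs.length < k → combs k xs = [] := by
  intro xs
  induction xs with
  | nil =>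
    intro k hk
    cases k with
    | zero => omega
    | succ k => rfl
  | cons x xs ih =>
    intro k hk
    cases k with
    | zero => omega
    | succ k =>
      rw [combs, ih k (by simp at hk; omega), ih (k + 1) (by simp at hk; omega)]
      rfl

-- The whole loop of A equals mapping pathToInt over the n-combinations (any n ≥ 2).
theorem main_eq (n : Int) (h1 : n ≠ 1) (h0 : ¬ n < 1) :
    (PySem.List.pyRange 1 10 1).flatMap (fun i => generate n [i] (i + 1))
      = (combs n.toNat (PySem.List.pyRange 1 10 1)).map pathToInt := by
  have hn : n.toNat = (n.toNat - 1) + 1 := by omega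
  rw [hn, combs_range_flatMap 10 _ 1 (by omega)]
  have : ∀ i ∈ PySem.List.pyRange 1 10 1,
      generate n [i] (i + 1)
        = ((combs (n.toNat - 1) (PySem.List.pyRange (i + 1) 10 1)).map (i :: ·)).map pathToInt := by
    intro i hi
    rw [PySem.List.mem_pyRange_one] at hi
    rw [generate,
      if_neg (by simp only [List.length_cons, List.length_nil]; push_cast; omega)]
    cases hk : n.toNat - 1 with
    | zero => omega
    | succ k' =>
      rw [genFor_eq 10 n k' _ _ (by omega)
        (by simp only [List.length_cons, List.length_nil]; push_cast; omega), ← hk]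
      simp [List.map_map, Function.comp_def]
  rw [List.flatMap_congr this]
  simp [List.map_flatMap]

-- ===== VERDICT (by name: the statement is the Claim_ definition above) =====
theorem increasingNumbers_spec : Claim_equal_increasingNumbers := by
  intro n _
  unfold Spec_increasingNumbers increasingNumbers increasingNumbers_alt
  by_cases h1 : n = 1
  · simp [h1]
  rw [if_neg h1, if_neg h1]
  rw [PySem.List.foldl_append_eq_flatMap]
  by_cases h0 : n < 1
  · rw [if_pos (Or.inl h0)]
    have : ∀ i ∈ PySem.List.pyRange 1 10 1, generate n [i] (i + 1) = [] := by
      intro i hi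
      rw [PySem.List.mem_pyRange_one] at hi
      rw [generate, if_neg (by simp only [List.length_cons, List.length_nil]; push_cast; omega)]
      exact genFor_nil 10 n _ _ (by omega)
        (by simp only [List.length_cons, List.length_nil]; push_cast; omega)
    simp [List.flatMap_eq_nil_iff.mpr this]
  · by_cases h9 : 9 < n
    · rw [if_pos (Or.inr h9), main_eq n h1 h0,
        combs_nil _ n.toNat (by rw [PySem.List.length_pyRange_one]; omega)]
      rfl
    · rw [if_neg (by omega)]
      exact main_eq n h1 h0
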